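-- pv_equiv track=rewrite | github.com/dsjoerg/blundercheck | combine/contest_20150310a/data_prep/make_moves_csv.py | compute_movegains
-- ===== SOURCE A (Python) =====
-- def compute_movegains(positionscores):
--
--     moves_list = []
--     last_equity = positionscores[0]
--     last_gain = 0
--     movenum = 0
--     side = 1
--
--     for positionscore in positionscores[1:]:
--
--         whitegain = None
--         movergain = None
--
--         whitegain = positionscore - last_equity
--         movergain = whitegain * side
--
--         mover_score = last_equity * side
--
--         move = [movenum, mover_score, movergain, last_gain]
--         moves_list.append( move )
--
--         last_equity = positionscore
--         last_gain = movergain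
--         side = side * -1
--         movenum = movenum + 1
--
--     return moves_list
-- ===== SOURCE B (Python) =====
-- def compute_movegains(positionscores):
--     out = []
--     for i in range(len(positionscores) - 1):
--         side = 1 if i % 2 == 0 else -1
--         mover_score = positionscores[i] * side
--         movergain = (positionscores[i + 1] - positionscores[i]) * side
--         last_gain = 0 if i == 0 else (positionscores[i] - positionscores[i - 1]) * (-side)
--         out.append([i, mover_score, movergain, last_gain])
--     return out
-- ===== Notes on version B (the rewrite author's own statement) =====
-- stated objective: alternative
-- what changed: Replaces A's state-threading loop (five running accumulators: last_equity, last_gain, movenum, side) with a stateless index-based pass that derives every field of row i directly from positionscores[i-1..i+1] and the parity of i.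
import Mathlib
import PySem

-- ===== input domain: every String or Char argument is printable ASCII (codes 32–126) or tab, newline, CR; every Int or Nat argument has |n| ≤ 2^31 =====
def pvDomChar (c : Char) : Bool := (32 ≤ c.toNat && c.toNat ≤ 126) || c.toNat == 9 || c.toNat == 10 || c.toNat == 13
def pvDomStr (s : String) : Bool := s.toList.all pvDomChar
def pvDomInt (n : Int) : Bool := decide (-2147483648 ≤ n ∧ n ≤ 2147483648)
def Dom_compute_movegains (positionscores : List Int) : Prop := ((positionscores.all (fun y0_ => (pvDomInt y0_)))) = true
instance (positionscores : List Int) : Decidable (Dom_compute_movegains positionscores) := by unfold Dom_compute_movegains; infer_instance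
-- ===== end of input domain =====

-- B replaces A's state-threading loop (running last_equity/last_gain/movenum/side accumulators)
-- by a stateless index-based pass deriving every row field from positionscores[i-1..i+1] and the parity of i;
-- equivalence is proved on non-empty lists (A raises IndexError on [], where B returns []).

-- ===== PORT A =====
-- loop body of A (one step of the for-loop, over the threaded state)
def stepA (s : List (List Int) × Int × Int × Int × Int) (positionscore : Int) :
    List (List Int) × Int × Int × Int × Int :=
  let (moves_list, last_equity, last_gain, movenum, side) := s
  let whitegain := positionscore - last_equity
  let movergain := whitegain * side
  let mover_score := last_equity * side
  let move := [movenum, mover_score, movergain, last_gain]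
  (moves_list ++ [move], positionscore, movergain, movenum + 1, side * -1)

def compute_movegains (positionscores : List Int) : List (List Int) :=
  match positionscores with
  | [] => []  -- Python A raises IndexError at positionscores[0]; excluded by Pre_
  | p0 :: _ =>
    -- moves_list = []; last_equity = positionscores[0]; last_gain = 0; movenum = 0; side = 1
    -- for positionscore in positionscores[1:]: …
    let st := (PySem.List.slice positionscores (some 1) none).foldl stepA ([], p0, 0, 0, 1)
    st.1

-- ===== PORT B =====
-- loop body of B: the row appended for index i, read off positionscores directly
def rowB (positionscores : List Int) (i : Int) : List Int :=
  let side : Int := if PySem.Int.mod i 2 = 0 then 1 else -1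
  let mover_score := PySem.List.pyGetD positionscores i 0 * side
  let movergain := (PySem.List.pyGetD positionscores (i + 1) 0 - PySem.List.pyGetD positionscores i 0) * side
  let last_gain := if i = 0 then 0 else (PySem.List.pyGetD positionscores i 0 - PySem.List.pyGetD positionscores (i - 1) 0) * (-side)
  [i, mover_score, movergain, last_gain]

def compute_movegains_alt (positionscores : List Int) : List (List Int) :=
  (PySem.List.pyRange 0 ((positionscores.length : Int) - 1) 1).foldl
    (fun out i => out ++ [rowB positionscores i]) []

-- ===== PRECONDITION & SPEC =====
-- Pre_ excludes exactly the empty list, on which Python A raises IndexError.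
def Pre_compute_movegains (positionscores : List Int) : Prop := positionscores ≠ []
instance (positionscores : List Int) : Decidable (Pre_compute_movegains positionscores) := by unfold Pre_compute_movegains; infer_instance
def pvWitness_compute_movegains : List Int := [3, -1, 4]

def Spec_compute_movegains (positionscores : List Int) (out : List (List Int)) : Prop := out = compute_movegains_alt positionscores
instance (positionscores : List Int) (out : List (List Int)) : Decidable (Spec_compute_movegains positionscores out) := by unfold Spec_compute_movegains; infer_instance

-- ===== CLAIM (what is proved, stated in full; the proofs are below) =====
def Claim_equal_compute_movegains : Prop := ∀ (positionscores : List Int), Dom_compute_movegains positionscores → Pre_compute_movegains positionscores → Spec_compute_movegains positionscores (compute_movegains positionscores)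
-- ===== LEMMAS AND PROOFS =====

-- the side multiplier and threaded last_gain of A, expressed from the index alone
def sdB (k : Nat) : Int := if k % 2 = 0 then 1 else -1

def lgB (xs : List Int) (k : Nat) : Int :=
  if k = 0 then 0 else (xs.getD k 0 - xs.getD (k - 1) 0) * (-(sdB k))

-- A's loop, written as structural recursion over the remaining scores
def goA (le lg mn sd : Int) : List Int → List (List Int)
  | [] => []
  | p :: rest => [mn, le * sd, (p - le) * sd, lg] :: goA p ((p - le) * sd) (mn + 1) (sd * -1) rest

theorem foldA (xs : List Int) (acc : List (List Int)) (le lg mn sd : Int) :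
    (xs.foldl stepA (acc, le, lg, mn, sd)).1 = acc ++ goA le lg mn sd xs := by
  induction xs generalizing acc le lg mn sd with
  | nil => simp [goA]
  | cons p rest ih => simp [stepA, goA, ih]

theorem sdB_succ (k : Nat) : sdB (k + 1) = sdB k * -1 := by
  rcases Nat.even_or_odd k with h | h
  · have h0 : k % 2 = 0 := Nat.even_iff.mp h
    simp [sdB, h0, Nat.succ_mod_two_eq_one_iff.mpr h0]
  · have h1 : k % 2 = 1 := Nat.odd_iff.mp h
    simp [sdB, h1, Nat.succ_mod_two_eq_zero_iff.mpr h1]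

theorem rowB_natCast (xs : List Int) (k : Nat) (hk : k + 1 < xs.length) :
    rowB xs (k : Int) = [(k : Int), xs.getD k 0 * sdB k,
      (xs.getD (k + 1) 0 - xs.getD k 0) * sdB k, lgB xs k] := by
  have hside : (if PySem.Int.mod (k : Int) 2 = 0 then (1 : Int) else -1) = sdB k := by
    rw [show ((2 : Int) = ((2 : Nat) : Int)) from rfl, PySem.Int.mod_natCast]
    simp [sdB]
    omega
  rcases Nat.eq_zero_or_pos k with h0 | h0
  · subst h0
    have e0 : PySem.List.pyGetD xs 0 0 = xs.getD 0 0 := by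
      exact_mod_cast PySem.List.pyGetD_natCast xs 0 0
    have e1 : PySem.List.pyGetD xs 1 0 = xs.getD 1 0 := by
      exact_mod_cast PySem.List.pyGetD_natCast xs 1 0
    norm_num [rowB, hside, lgB, e0, e1, sdB]
  · have h1 : ((k : Int) + 1) = ((k + 1 : Nat) : Int) := by omega
    have h2 : ((k : Int) - 1) = ((k - 1 : Nat) : Int) := by
      have : (1 : Nat) ≤ k := h0
      push_cast [this]; ring
    have h3 : (k : Int) ≠ 0 := by exact_mod_cast Nat.pos_iff_ne_zero.mp h0
    simp only [rowB, hside, h1, h2, PySem.List.pyGetD_natCast, lgB, h3,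
      if_neg (Nat.pos_iff_ne_zero.mp h0)]
    simp

theorem goA_eq_map (d : Nat) : ∀ (k : Nat) (xs : List Int), xs.length = k + 1 + d →
    goA (xs.getD k 0) (lgB xs k) (k : Int) (sdB k) (xs.drop (k + 1)) =
      (PySem.List.pyRange (k : Int) ((xs.length : Int) - 1) 1).map (rowB xs) := by
  induction d with
  | zero =>
    intro k xs hlen
    rw [List.drop_eq_nil_of_le (by omega), PySem.List.pyRange_one_eq_nil (by omega)]
    simp [goA]
  | succ d ih =>
    intro k xs hlen
    have hk1 : k + 1 < xs.length := by omega
    have hdrop : xs.drop (k + 1) = xs[k + 1] :: xs.drop (k + 2) := List.drop_eq_getElem_cons hk1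
    have hget : xs[k + 1] = xs.getD (k + 1) 0 := (List.getD_eq_getElem xs 0 hk1).symm
    rw [hdrop, hget]
    simp only [goA]
    rw [PySem.List.pyRange_one_cons (by omega), List.map_cons]
    congr 1
    · rw [rowB_natCast xs k hk1]
    · have hlg : (xs.getD (k + 1) 0 - xs.getD k 0) * sdB k = lgB xs (k + 1) := by
        simp [lgB, sdB_succ]
      have hmn : (k : Int) + 1 = ((k + 1 : Nat) : Int) := by omega
      rw [hlg, hmn, ← sdB_succ]
      exact ih (k + 1) xs (by omega)

-- ===== VERDICT (by name: the statement is the Claim_ definition above) =====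
theorem compute_movegains_spec : Claim_equal_compute_movegains := by
  intro xs _ hpre
  unfold Spec_compute_movegains compute_movegains compute_movegains_alt
  match xs with
  | [] => exact absurd rfl hpre
  | p0 :: rest =>
    rw [PySem.List.foldl_append_singleton_eq_map]
    simp only [PySem.List.slice_from_one, List.tail_cons]
    rw [foldA rest [] p0 0 0 1]
    have h := goA_eq_map rest.length 0 (p0 :: rest) (by simp [Nat.add_comm])
    simpa [lgB, sdB] using h
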